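-- pv_equiv track=rewrite | github.com/maghen2/Apprendre-coder-Python-ULB-UpyLaB | 6-Ensembles-et-dictionnaires/Exercice-UpyLab-6.8.py | store_email
-- ===== SOURCE A (Python) =====
-- def store_email(liste_mails):
--     domaines = {}
--     for email in liste_mails:
--         domaine, utilisateur = email.split('@')
--         if domaine in domaines:
--             domaines[domaine].append(utilisateur)
--         else:
--             domaines[domaine] = [utilisateur]
--     for domaine in domaines:
--         domaines[domaine].sort()
--     return domaines
-- ===== SOURCE B (Python) =====
-- def _insert_sorted(bucket, u):
--     # insert u into the already-sorted bucket, keeping it sorted (after equals)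
--     for i, x in enumerate(bucket):
--         if u < x:
--             return bucket[:i] + [u] + bucket[i:]
--     return bucket + [u]
--
--
-- def store_email(liste_mails):
--     domaines = {}
--     for email in liste_mails:
--         domaine, utilisateur = email.split('@')
--         domaines[domaine] = _insert_sorted(domaines.get(domaine, []), utilisateur)
--     return domaines
-- ===== Notes on version B (the rewrite author's own statement) =====
-- stated objective: alternative
-- what changed: B keeps every bucket sorted at all times by inserting each user at its sorted position as it arrives (online insertion), so the final per-bucket .sort() pass of A disappears entirely.
import Mathlib
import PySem

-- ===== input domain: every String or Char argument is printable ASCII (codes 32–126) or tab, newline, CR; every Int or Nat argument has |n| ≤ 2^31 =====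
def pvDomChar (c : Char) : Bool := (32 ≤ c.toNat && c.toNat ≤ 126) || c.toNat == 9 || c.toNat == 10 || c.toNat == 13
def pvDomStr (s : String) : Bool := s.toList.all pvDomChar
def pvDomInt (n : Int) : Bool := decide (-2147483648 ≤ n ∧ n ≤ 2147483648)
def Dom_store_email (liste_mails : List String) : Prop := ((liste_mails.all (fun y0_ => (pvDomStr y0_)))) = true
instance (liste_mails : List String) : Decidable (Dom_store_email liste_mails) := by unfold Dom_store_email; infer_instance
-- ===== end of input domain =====

-- B keeps each bucket sorted as it goes (online sorted insertion) instead of A's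
-- append-then-sort; same return value, proved equal.

-- ===== PORT A =====
-- Port of A: group users by the part before '@' (dict in insertion order, append to
-- the bucket), then the second loop sorts each bucket in place (rendered as a map
-- over the dict's items, the order the loop visits them).
def store_email (liste_mails : List String) : List (String × List String) :=
  let domaines := liste_mails.foldl (fun d email =>
    match PySem.Str.split? email "@" with
    | some [domaine, utilisateur] =>
        if d.contains domaine then
          d.insert domaine (d.getD domaine [] ++ [utilisateur])
        else
          d.insert domaine [utilisateur]
    | _ => d) PySem.Dict.empty
  domaines.items.map (fun p => (p.1, PySem.List.sorted p.2 (fun x => x) false))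

-- ===== PORT B =====
-- helper of B: insert u into an already-sorted bucket, before the first greater element
def insertSorted : List String → String → List String
  | [], u => [u]
  | x :: xs, u => if u < x then u :: x :: xs else x :: insertSorted xs u

-- the tuple unpack 'domaine, utilisateur = …' succeeds exactly when the split has 2 parts
def store_email_alt (liste_mails : List String) : List (String × List String) :=
  (liste_mails.foldl (fun d email =>
    let parts := (PySem.Str.split? email "@").getD []
    if parts.length = 2 then
      d.insert (parts.getD 0 "") (insertSorted (d.getD (parts.getD 0 "") []) (parts.getD 1 ""))
    else d) PySem.Dict.empty).items

-- ===== PRECONDITION & SPEC =====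
-- Pre_ excludes exactly the inputs where Python A raises: an email without exactly
-- one '@' makes 'domaine, utilisateur = email.split("@")' raise a ValueError.
def Pre_store_email (liste_mails : List String) : Prop :=
  ∀ email ∈ liste_mails, PySem.Str.count email "@" = 1
instance (liste_mails : List String) : Decidable (Pre_store_email liste_mails) := by unfold Pre_store_email; infer_instance

def pvWitness_store_email : List String := ["bob@ulb.be", "alice@ulb.be", "zoe@vub.be", "ann@ulb.be"]

def Spec_store_email (liste_mails : List String) (out : List (String × List String)) : Prop := out = store_email_alt liste_mails
instance (liste_mails : List String) (out : List (String × List String)) : Decidable (Spec_store_email liste_mails out) := by unfold Spec_store_email; infer_instance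

-- ===== CLAIM (what is proved, stated in full; the proofs are below) =====
def Claim_equal_store_email : Prop := ∀ (liste_mails : List String), Dom_store_email liste_mails → Pre_store_email liste_mails → Spec_store_email liste_mails (store_email liste_mails)

-- ===== LEMMAS AND PROOFS =====

-- sort every bucket of a dict (what A's second loop does), as a dict
def sortVals (d : PySem.Dict String (List String)) : PySem.Dict String (List String) :=
  PySem.Dict.mk (d.items.map (fun p => (p.1, PySem.List.sorted p.2 (fun x => x) false)))

theorem insertSorted_perm (l : List String) (u : String) : (insertSorted l u).Perm (u :: l) := by
  induction l with
  | nil => simp [insertSorted]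
  | cons x xs ih =>
      simp only [insertSorted]
      split
      · exact List.Perm.refl _
      · exact (List.Perm.cons x ih).trans (List.Perm.swap u x xs)

theorem insertSorted_pairwise (l : List String) (u : String)
    (h : l.Pairwise (· ≤ ·)) : (insertSorted l u).Pairwise (· ≤ ·) := by
  induction l with
  | nil => simp [insertSorted]
  | cons x xs ih =>
      rw [List.pairwise_cons] at h
      simp only [insertSorted]
      split
      · rename_i hu
        refine List.pairwise_cons.mpr ⟨?_, List.pairwise_cons.mpr h⟩
        intro a ha
        rcases List.mem_cons.mp ha with rfl | ha'
        · exact le_of_lt hu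
        · exact (le_of_lt hu).trans (h.1 a ha')
      · rename_i hu
        refine List.pairwise_cons.mpr ⟨?_, ih h.2⟩
        intro a ha
        rcases List.mem_cons.mp ((insertSorted_perm xs u).mem_iff.mp ha) with rfl | ha'
        · exact le_of_not_gt hu
        · exact h.1 a ha'

theorem sorted_append_singleton (v : List String) (u : String) :
    PySem.List.sorted (v ++ [u]) (fun x => x) false
      = insertSorted (PySem.List.sorted v (fun x => x) false) u := by
  apply PySem.List.sorted_id_eq_of_perm_of_pairwise
  · exact (insertSorted_perm _ u).trans
      (((PySem.List.sorted_perm v (fun x => x) false).cons u).trans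
        (List.perm_append_singleton u v).symm)
  · exact insertSorted_pairwise _ u (PySem.List.sorted_pairwise v (fun x => x))

theorem sorted_nil :
    PySem.List.sorted ([] : List String) (fun x => x) false = [] :=
  PySem.List.sorted_eq_self_of_pairwise _ _ (List.Pairwise.nil)

theorem sorted_singleton (u : String) :
    PySem.List.sorted [u] (fun x => x) false = [u] :=
  PySem.List.sorted_eq_self_of_pairwise _ _ (List.pairwise_singleton _ _)

theorem keys_sortVals (d : PySem.Dict String (List String)) : (sortVals d).keys = d.keys := by
  obtain ⟨items⟩ := d
  simp [sortVals, PySem.Dict.keys_mk, List.map_map, Function.comp_def]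

theorem contains_sortVals (d : PySem.Dict String (List String)) (k : String) :
    (sortVals d).contains k = d.contains k := by
  obtain ⟨items⟩ := d
  simp [sortVals, PySem.Dict.contains_mk, List.any_map, Function.comp_def]

theorem getD_sortVals (d : PySem.Dict String (List String)) (k : String)
    (hnd : d.keys.Nodup) :
    (sortVals d).getD k [] = PySem.List.sorted (d.getD k []) (fun x => x) false := by
  by_cases hc : d.contains k = true
  · have hg : (d.get? k).isSome := by
      rw [← PySem.Dict.contains_eq_isSome_get?]; exact hc
    obtain ⟨v, hv⟩ := Option.isSome_iff_exists.mp hg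
    have hmem : (k, v) ∈ d.items := PySem.Dict.mem_items_of_get?_eq_some d hv
    have hmem' : (k, PySem.List.sorted v (fun x => x) false) ∈ (sortVals d).items := by
      obtain ⟨items⟩ := d
      simp only [sortVals]
      exact List.mem_map.mpr ⟨(k, v), hmem, rfl⟩
    rw [PySem.Dict.getD_of_mem_items _ hmem' (by rw [keys_sortVals]; exact hnd)]
    rw [PySem.Dict.getD_of_get?_eq_some d [] hv]
  · have hc' : d.contains k = false := by simpa using hc
    rw [PySem.Dict.getD_of_not_contains (sortVals d) [] (by rw [contains_sortVals]; exact hc'),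
        PySem.Dict.getD_of_not_contains d [] hc', sorted_nil]

-- one step of the two folds agree through sortVals
theorem step_eq (d : PySem.Dict String (List String)) (email : String)
    (hnd : d.keys.Nodup) :
    (let parts := (PySem.Str.split? email "@").getD []
     if parts.length = 2 then
       (sortVals d).insert (parts.getD 0 "") (insertSorted ((sortVals d).getD (parts.getD 0 "") []) (parts.getD 1 ""))
     else sortVals d)
    = sortVals (match PySem.Str.split? email "@" with
      | some [domaine, utilisateur] =>
          if d.contains domaine then
            d.insert domaine (d.getD domaine [] ++ [utilisateur])
          else
            d.insert domaine [utilisateur]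
      | _ => d) := by
  rcases hs : PySem.Str.split? email "@" with _ | ⟨_ | ⟨dom, _ | ⟨user, _ | rest⟩⟩⟩ <;> try rfl
  show ite _ _ _ = _
  rw [if_pos (by simp)]
  simp only [Option.getD_some, List.getD_cons_zero, List.getD_cons_succ]
  by_cases hc : d.contains dom = true
  · rw [if_pos hc]
    apply PySem.Dict.ext
    rw [PySem.Dict.items_insert_of_contains _ _ (by rw [contains_sortVals]; exact hc),
        getD_sortVals d dom hnd]
    have hA := PySem.Dict.items_insert_of_contains d (d.getD dom [] ++ [user]) hc
    obtain ⟨items⟩ := d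
    simp only [sortVals] at *
    rw [hA, List.map_map, List.map_map]
    apply List.map_congr_left
    intro p hp
    by_cases hpk : (p.1 == dom) = true
    · have hpe : p.1 = dom := by simpa using hpk
      have hval : PySem.Dict.getD ⟨items⟩ dom [] = p.2 := by
        apply PySem.Dict.getD_of_mem_items _ _ hnd
        rw [← hpe]; exact hp
      simp only [Function.comp_def, hpk, if_pos, hval]
      simp [sorted_append_singleton]
    · have hne : p.1 ≠ dom := by simpa using hpk
      simp [hne]
  · have hc' : d.contains dom = false := by simpa using hc
    rw [if_neg (by simp [hc'])]
    apply PySem.Dict.ext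
    rw [PySem.Dict.items_insert_of_not_contains (sortVals d) _ (by rw [contains_sortVals]; exact hc'),
        getD_sortVals d dom hnd]
    · rw [PySem.Dict.getD_of_not_contains d [] hc']
      have hA := PySem.Dict.items_insert_of_not_contains d [user] hc'
      obtain ⟨items⟩ := d
      simp only [sortVals] at *
      rw [hA, List.map_append]
      simp only [sorted_nil]
      simp [insertSorted]
      exact (sorted_singleton user).symm

theorem fold_eq (l : List String) (d : PySem.Dict String (List String)) (hnd : d.keys.Nodup) :
    l.foldl (fun d email =>
      let parts := (PySem.Str.split? email "@").getD []
      if parts.length = 2 then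
        d.insert (parts.getD 0 "") (insertSorted (d.getD (parts.getD 0 "") []) (parts.getD 1 ""))
      else d) (sortVals d)
    = sortVals (l.foldl (fun d email =>
      match PySem.Str.split? email "@" with
      | some [domaine, utilisateur] =>
          if d.contains domaine then
            d.insert domaine (d.getD domaine [] ++ [utilisateur])
          else
            d.insert domaine [utilisateur]
      | _ => d) d) := by
  induction l generalizing d with
  | nil => simp
  | cons e rest ih =>
      simp only [List.foldl_cons]
      rw [step_eq d e hnd]
      apply ih
      rcases hs : PySem.Str.split? e "@" with _ | ⟨_ | ⟨dom, _ | ⟨user, _ | _⟩⟩⟩ <;>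
        try exact hnd
      simp only []
      split <;> exact PySem.Dict.nodup_keys_insert _ _ _ hnd

-- ===== VERDICT (by name: the statement is the Claim_ definition above) =====
theorem store_email_spec : Claim_equal_store_email := by
  intro liste_mails _ _
  unfold Spec_store_email store_email store_email_alt
  have h := fold_eq liste_mails PySem.Dict.empty (PySem.Dict.nodup_keys_empty)
  have hempty : sortVals (PySem.Dict.empty) = (PySem.Dict.empty : PySem.Dict String (List String)) := rfl
  rw [hempty] at h
  rw [h]
  rfl
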